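-- pv_equiv track=rewrite | github.com/eukosh/tax-calculator | src/moving_average.py | _append_unique_note_text
-- ===== SOURCE A (Python) =====
-- def _append_unique_note_text(existing: str, incoming: str) -> str:
--     merged: list[str] = []
--     seen: set[str] = set()
--     for part in (piece.strip() for piece in existing.split(";")):
--         if not part or part in seen:
--             continue
--         merged.append(part)
--         seen.add(part)
--     for part in (piece.strip() for piece in incoming.split(";")):
--         if not part or part in seen:
--             continue
--         merged.append(part)
--         seen.add(part)
--     return "; ".join(merged)
-- ===== SOURCE B (Python) =====
-- def _append_unique_note_text(existing: str, incoming: str) -> str: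
--     def first_only(parts):
--         # keep the first occurrence of each non-empty part by recursing:
--         # keep the head, then delete its later duplicates before recursing
--         if not parts:
--             return []
--         head = parts[0]
--         if not head:
--             return first_only(parts[1:])
--         return [head] + first_only([p for p in parts[1:] if p != head])
--
--     parts = [p.strip() for p in existing.split(";") + incoming.split(";")]
--     return "; ".join(first_only(parts))
-- ===== Notes on version B (the rewrite author's own statement) =====
-- stated objective: alternative
-- what changed: Replaces A's two seen-set accumulation loops by a recursive selection-style dedup with no auxiliary set: each kept head deletes its later duplicates from the remainder before recursing.
import Mathlib
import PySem

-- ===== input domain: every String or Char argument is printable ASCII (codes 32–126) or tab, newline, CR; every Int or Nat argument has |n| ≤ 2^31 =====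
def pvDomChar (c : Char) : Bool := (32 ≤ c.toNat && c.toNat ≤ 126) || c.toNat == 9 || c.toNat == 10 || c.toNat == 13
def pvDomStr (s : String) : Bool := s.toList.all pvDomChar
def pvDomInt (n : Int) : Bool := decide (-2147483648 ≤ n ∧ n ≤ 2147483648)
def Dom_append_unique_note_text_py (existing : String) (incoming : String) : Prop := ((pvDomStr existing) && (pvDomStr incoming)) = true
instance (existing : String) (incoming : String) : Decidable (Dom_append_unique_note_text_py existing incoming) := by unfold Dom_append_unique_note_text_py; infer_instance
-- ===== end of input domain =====

-- B replaces A's two seen-set accumulation loops by a recursive selection-style dedup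
-- (each kept head deletes its later duplicates before recursing); alternative, no speed claim.

-- s.split(";") (";" is never empty, so Python's split cannot raise); exact via PySem.Chars.splitOn
def auntSplit (s : String) : List String :=
  (PySem.Chars.splitOn s.toList [';']).map String.ofList

-- ===== PORT A =====
-- the body of A's loop: part = piece.strip(); skip if empty or seen, else append to merged and add to seen
def auntStep (st : List String × PySem.Set String) (piece : String) :
    List String × PySem.Set String :=
  let part := PySem.Str.strip piece
  if part == "" || PySem.Set.contains st.2 part then st
  else (st.1 ++ [part], PySem.Set.add st.2 part)

def append_unique_note_text_py (existing : String) (incoming : String) : String :=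
  let st1 := (auntSplit existing).foldl auntStep ([], PySem.Set.empty)
  let st2 := (auntSplit incoming).foldl auntStep st1
  PySem.Str.join "; " st2.1

-- ===== PORT B =====
-- Source B's first_only: keep head, delete its later duplicates from the tail, recurse
def auntFirstOnly : List String → List String
  | [] => []
  | h :: t =>
    if h == "" then auntFirstOnly t
    else h :: auntFirstOnly (t.filter (fun p => p != h))
termination_by l => l.length
decreasing_by
  · simp
  · simpa using List.length_filter_le (fun x => x != h) t

def append_unique_note_text_py_alt (existing : String) (incoming : String) : String :=
  let parts := (auntSplit existing ++ auntSplit incoming).map PySem.Str.strip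
  PySem.Str.join "; " (auntFirstOnly parts)

-- ===== PRECONDITION & SPEC =====
def Spec_append_unique_note_text_py (existing : String) (incoming : String) (out : String) : Prop := out = append_unique_note_text_py_alt existing incoming
instance (existing : String) (incoming : String) (out : String) : Decidable (Spec_append_unique_note_text_py existing incoming out) := by unfold Spec_append_unique_note_text_py; infer_instance

-- ===== CLAIM (what is proved, stated in full; the proofs are below) =====
def Claim_equal_append_unique_note_text_py : Prop := ∀ (existing : String) (incoming : String), Dom_append_unique_note_text_py existing incoming → Spec_append_unique_note_text_py existing incoming (append_unique_note_text_py existing incoming)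

-- ===== LEMMAS AND PROOFS =====
-- A's loop keeps merged = seen; from a state (m, m) it computes Set.update m (stripped nonempty parts)
theorem auntLoop_eq (parts : List String) (m : List String) :
    parts.foldl auntStep (m, m) =
      (PySem.Set.update m ((parts.map PySem.Str.strip).filter (fun p => !(p == ""))),
       PySem.Set.update m ((parts.map PySem.Str.strip).filter (fun p => !(p == "")))) := by
  induction parts generalizing m with
  | nil => simp [PySem.Set.update_nil]
  | cons p ps ih =>
    rw [List.foldl_cons]
    by_cases h : PySem.Str.strip p = ""
    · rw [show auntStep (m, m) p = (m, m) by simp [auntStep, h]]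
      rw [ih m]
      simp [h]
    · by_cases hm : PySem.Str.strip p ∈ m
      · rw [show auntStep (m, m) p = (m, m) by simp [auntStep, hm]]
        rw [ih m]
        simp [h, PySem.Set.update_cons, PySem.Set.add_of_mem hm]
      · rw [show auntStep (m, m) p = (m ++ [PySem.Str.strip p], m ++ [PySem.Str.strip p]) by
          simp [auntStep, h, hm]]
        rw [ih (m ++ [PySem.Str.strip p])]
        simp [h, PySem.Set.update_cons, PySem.Set.add_of_not_mem hm]

-- updating with a list from which a member of m was deleted is the same update
theorem update_filter_mem (l : List String) (m : List String) (x : String) (hm : x ∈ m) :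
    PySem.Set.update m (l.filter (fun p => p != x)) = PySem.Set.update m l := by
  induction l generalizing m with
  | nil => rfl
  | cons p t ih =>
    by_cases h : p = x
    · subst h
      simp only [List.filter_cons, bne_self_eq_false, Bool.false_eq_true, if_false,
        PySem.Set.update_cons, PySem.Set.add_of_mem hm]
      exact ih m hm
    · simp only [List.filter_cons, bne_iff_ne, ne_eq, h, not_false_eq_true, if_pos,
        PySem.Set.update_cons]
      exact ih _ (by rw [PySem.Set.mem_add]; exact Or.inl hm)

-- B's recursive dedup computes the same list A's seen-set accumulation computes
theorem firstOnly_eq : ∀ (n : ℕ) (l : List String), l.length ≤ n →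
    ∀ m : List String, (∀ p ∈ l, p ∉ m) →
    PySem.Set.update m (l.filter (fun p => !(p == ""))) = m ++ auntFirstOnly l := by
  intro n
  induction n with
  | zero =>
    intro l hl m _
    have : l = [] := by cases l <;> simp_all
    rw [this]
    simp [auntFirstOnly, PySem.Set.update_nil]
  | succ n ih =>
    intro l hl m hd
    match l with
    | [] => simp [auntFirstOnly, PySem.Set.update_nil]
    | h :: t =>
      by_cases hh : h = ""
      · subst hh
        rw [auntFirstOnly]
        simp only [List.filter_cons, beq_self_eq_true, Bool.not_true]
        exact ih t (Nat.le_of_succ_le_succ hl) m (fun p hp => hd p (List.mem_cons_of_mem _ hp))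
      · have hnm : h ∉ m := hd h (List.mem_cons_self)
        rw [auntFirstOnly]
        simp only [List.filter_cons, beq_iff_eq, hh, Bool.not_eq_true', beq_eq_false_iff_ne,
          ne_eq, not_false_eq_true, if_pos]
        rw [PySem.Set.update_cons, PySem.Set.add_of_not_mem hnm]
        rw [← update_filter_mem (t.filter (fun p => !(p == ""))) (m ++ [h]) h (by simp)]
        rw [List.filter_comm]
        rw [ih (t.filter (fun p => p != h))
          (le_trans (List.length_filter_le _ t) (Nat.le_of_succ_le_succ hl))
          (m ++ [h]) ?_]
        · simp
        · intro p hp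
          rw [List.mem_filter] at hp
          simp only [List.mem_append, List.mem_singleton, not_or]
          exact ⟨hd p (List.mem_cons_of_mem _ hp.1), by simpa using hp.2⟩

-- ===== VERDICT (by name: the statement is the Claim_ definition above) =====
theorem append_unique_note_text_py_spec : Claim_equal_append_unique_note_text_py := by
  intro existing incoming _
  show _ = _
  simp only [append_unique_note_text_py, append_unique_note_text_py_alt,
    show (PySem.Set.empty (α := String)) = ([] : List String) from rfl, auntLoop_eq]
  rw [← PySem.Set.update_append, ← List.filter_append, ← List.map_append]
  rw [firstOnly_eq ((auntSplit existing ++ auntSplit incoming).map PySem.Str.strip).length _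
    le_rfl [] (by simp)]
  simp
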